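-- pv_equiv track=rewrite | github.com/gcharris/writers-factory-app | backend/services/prompt_assembler.py | _get_mode_essentials
-- ===== SOURCE A (Python) =====
-- def _get_mode_essentials(mode_rules: str) -> str:
--     """Extract essential mode rules for minimal tier."""
--     # Get title and first major section
--     lines = mode_rules.split('\n')
--     essentials = []
--     section_count = 0
--
--     for line in lines:
--         essentials.append(line)
--         if line.startswith('## '):
--             section_count += 1
--             if section_count >= 2:  # Title + one section
--                 break
--
--     return '\n'.join(essentials)
-- ===== SOURCE B (Python) =====
-- def _get_mode_essentials(mode_rules: str) -> str:
--     """Extract essential mode rules for minimal tier."""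
--     lines = mode_rules.split('\n')
--     headers = [i for i, line in enumerate(lines) if line.startswith('## ')]
--     if len(headers) >= 2:
--         lines = lines[:headers[1] + 1]
--     return '\n'.join(lines)
-- ===== Notes on version B (the rewrite author's own statement) =====
-- stated objective: simpler
-- what changed: Replaces the accumulate-with-running-counter-and-break loop by building the list of section-header line indices once and slicing the line list up to and including the second header (keeping everything when there are fewer than two headers).
import Mathlib
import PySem

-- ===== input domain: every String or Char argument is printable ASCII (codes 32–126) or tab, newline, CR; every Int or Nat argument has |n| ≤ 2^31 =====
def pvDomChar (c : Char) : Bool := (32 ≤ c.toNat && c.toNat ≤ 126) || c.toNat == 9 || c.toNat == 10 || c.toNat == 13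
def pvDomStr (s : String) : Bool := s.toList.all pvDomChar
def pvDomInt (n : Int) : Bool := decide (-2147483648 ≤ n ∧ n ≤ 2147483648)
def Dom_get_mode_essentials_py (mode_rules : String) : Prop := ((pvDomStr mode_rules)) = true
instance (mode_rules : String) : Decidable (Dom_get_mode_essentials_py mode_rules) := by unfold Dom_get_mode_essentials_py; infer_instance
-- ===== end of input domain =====

-- B replaces A's running-counter accumulate-and-break loop by a header-index table plus one slice (objective: simpler decomposition).

-- ===== PORT A =====
-- line.startswith('## ')  (shared between both ports; exact via PySem.Chars)
def pvHdr (l : List Char) : Bool := PySem.Chars.startswith l ['#', '#', ' ']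

-- the for-loop of A with its `section_count` state and `break` (break = stop recursing)
def pvALoop : List (List Char) → Nat → List (List Char)
  | [], _ => []
  | l :: ls, c =>
    if pvHdr l then
      if c + 1 ≥ 2 then [l]
      else l :: pvALoop ls (c + 1)
    else l :: pvALoop ls c

def get_mode_essentials_py (mode_rules : String) : String :=
  String.ofList (PySem.Chars.join ['\n'] (pvALoop (PySem.Chars.splitOn mode_rules.toList ['\n']) 0))

-- ===== PORT B =====
-- the comprehension [i for i, line in enumerate(lines) if line.startswith('## ')]
def pvHeaders (lines : List (List Char)) : List Int :=
  (PySem.List.enumerate lines 0).filterMap (fun p => if pvHdr p.2 then some p.1 else none)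

-- if len(headers) >= 2: lines = lines[:headers[1] + 1]
def pvBSel (lines : List (List Char)) : List (List Char) :=
  let headers := pvHeaders lines
  if headers.length ≥ 2 then PySem.List.slice lines none (some (headers[1]! + 1))
  else lines

def get_mode_essentials_py_alt (mode_rules : String) : String :=
  String.ofList (PySem.Chars.join ['\n'] (pvBSel (PySem.Chars.splitOn mode_rules.toList ['\n'])))

-- ===== PRECONDITION & SPEC =====
def Spec_get_mode_essentials_py (mode_rules : String) (out : String) : Prop := out = get_mode_essentials_py_alt mode_rules
instance (mode_rules : String) (out : String) : Decidable (Spec_get_mode_essentials_py mode_rules out) := by unfold Spec_get_mode_essentials_py; infer_instance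

-- ===== CLAIM (what is proved, stated in full; the proofs are below) =====
def Claim_equal_get_mode_essentials_py : Prop := ∀ (mode_rules : String), Dom_get_mode_essentials_py mode_rules → Spec_get_mode_essentials_py mode_rules (get_mode_essentials_py mode_rules)

-- ===== LEMMAS AND PROOFS =====

-- relative (Nat) positions of the header lines
def pvIdx : List (List Char) → List Nat
  | [] => []
  | l :: ls =>
    if pvHdr l then 0 :: (pvIdx ls).map (· + 1)
    else (pvIdx ls).map (· + 1)

theorem pvHeaders_enum (ls : List (List Char)) (s : Int) :
    (PySem.List.enumerate ls s).filterMap (fun p => if pvHdr p.2 then some p.1 else none)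
    = (pvIdx ls).map (fun n => s + (n : Int)) := by
  induction ls generalizing s with
  | nil => simp [pvIdx]
  | cons l ls ih =>
    cases h : pvHdr l with
    | true =>
      simp [PySem.List.enumerate_cons, pvIdx, h, ih, List.map_flatMap, List.flatMap_map]
      exact List.flatMap_congr (fun n _ => by ring_nf)
    | false =>
      simp [PySem.List.enumerate_cons, pvIdx, h, ih, List.map_flatMap, List.flatMap_map]
      exact List.flatMap_congr (fun n _ => by ring_nf)
theorem pvHeaders_eq (ls : List (List Char)) :
    pvHeaders ls = (pvIdx ls).map (fun n => (n : Int)) := by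
  unfold pvHeaders
  rw [pvHeaders_enum]
  simp

theorem pvALoop_one (ls : List (List Char)) :
    pvALoop ls 1 = (match pvIdx ls with
      | [] => ls
      | i :: _ => ls.take (i + 1)) := by
  induction ls with
  | nil => simp [pvALoop, pvIdx]
  | cons l ls ih =>
    cases h : pvHdr l with
    | true => simp [pvALoop, pvIdx, h]
    | false =>
      simp only [pvALoop, pvIdx, h, Bool.false_eq_true, if_false]
      cases hi : pvIdx ls with
      | nil => simp [ih, hi]
      | cons i rest => simp [ih, hi, List.take_succ_cons]

theorem pvALoop_zero (ls : List (List Char)) :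
    pvALoop ls 0 = (match pvIdx ls with
      | _ :: j :: _ => ls.take (j + 1)
      | _ => ls) := by
  induction ls with
  | nil => simp [pvALoop, pvIdx]
  | cons l ls ih =>
    cases h : pvHdr l with
    | true =>
      simp only [pvALoop, pvIdx, h, if_pos]
      have h2 : ¬ (0 + 1 ≥ 2) := by omega
      rw [if_neg h2, pvALoop_one ls]
      cases hi : pvIdx ls with
      | nil => simp
      | cons i rest => simp [List.take_succ_cons]
    | false =>
      simp only [pvALoop, pvIdx, h, Bool.false_eq_true, if_false]
      cases hi : pvIdx ls with
      | nil => simp [ih, hi]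
      | cons i rest =>
        cases rest with
        | nil => simp [ih, hi]
        | cons j rest' => simp [ih, hi, List.take_succ_cons]

theorem pvSel_eq (ls : List (List Char)) : pvALoop ls 0 = pvBSel ls := by
  rw [pvALoop_zero]
  unfold pvBSel
  rw [pvHeaders_eq]
  cases hi : pvIdx ls with
  | nil => simp
  | cons i rest =>
    cases rest with
    | nil => simp
    | cons j rest' =>
      have hlen : (((i :: j :: rest').map (fun n => (n : Int))).length ≥ 2) := by simp
      rw [if_pos hlen]
      have hget : ((i :: j :: rest').map (fun n => (n : Int)))[1]! = (j : Int) := by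
        simp [getElem!_pos]
      rw [hget]
      have hc : ((j : Int) + 1) = ((j + 1 : Nat) : Int) := by push_cast; ring
      rw [hc, PySem.List.slice_to_natCast]

-- ===== VERDICT (by name: the statement is the Claim_ definition above) =====
theorem get_mode_essentials_py_spec : Claim_equal_get_mode_essentials_py := by
  intro s _
  unfold Spec_get_mode_essentials_py get_mode_essentials_py get_mode_essentials_py_alt
  rw [pvSel_eq]
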